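-- pv_equiv track=rewrite | github.com/arthist03/MediPackages_Server | main.py | _check_intent_rule_violation
-- ===== SOURCE A (Python) =====
-- def _check_intent_rule_violation(intents: dict[str, str]) -> str | None:
--     """Check if the intents violate Rule 1 (mix of Surgical and Medical)."""
--     if not intents:
--         return None
--     has_surgical = any(v.lower() == "surgical" for v in intents.values())
--     has_medical = any(v.lower() == "medical" for v in intents.values())
--
--     if has_surgical and has_medical:
--         surgical_terms = [k for k, v in intents.items() if v.lower() == "surgical"]
--         medical_terms = [k for k, v in intents.items() if v.lower() == "medical"]
--         return f"Rule 1 VIOLATION: Cannot combine surgical procedures ({', '.join(surgical_terms)}) with medical management conditions ({', '.join(medical_terms)})."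
--     return None
-- ===== SOURCE B (Python) =====
-- def _check_intent_rule_violation(intents: dict[str, str]) -> str | None:
--     """Check if the intents violate Rule 1 (mix of Surgical and Medical)."""
--     surgical_terms = []
--     medical_terms = []
--     for k, v in intents.items():
--         lv = v.lower()
--         if lv == "surgical":
--             surgical_terms.append(k)
--         elif lv == "medical":
--             medical_terms.append(k)
--     if surgical_terms and medical_terms:
--         return f"Rule 1 VIOLATION: Cannot combine surgical procedures ({', '.join(surgical_terms)}) with medical management conditions ({', '.join(medical_terms)})."
--     return None
-- ===== Notes on version B (the rewrite author's own statement) =====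
-- stated objective: simpler
-- what changed: Replaced the empty-check, the two any() scans and the two filtering comprehensions (up to five passes over the dict) by a single loop over intents.items() that accumulates both term lists at once, deciding from their emptiness.
import Mathlib
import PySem

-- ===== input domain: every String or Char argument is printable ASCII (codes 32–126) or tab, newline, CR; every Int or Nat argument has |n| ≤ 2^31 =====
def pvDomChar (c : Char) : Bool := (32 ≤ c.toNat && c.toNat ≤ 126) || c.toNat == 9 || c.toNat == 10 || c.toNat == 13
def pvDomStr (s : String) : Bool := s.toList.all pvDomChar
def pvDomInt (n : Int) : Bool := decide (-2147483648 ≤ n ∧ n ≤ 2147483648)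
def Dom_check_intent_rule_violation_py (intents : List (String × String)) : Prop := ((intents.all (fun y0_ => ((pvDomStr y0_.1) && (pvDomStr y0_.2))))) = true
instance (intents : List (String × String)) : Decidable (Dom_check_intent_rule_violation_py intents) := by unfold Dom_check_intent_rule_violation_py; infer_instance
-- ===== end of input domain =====

-- B replaces A's empty-check, two any() scans and two filtering comprehensions by one
-- accumulating pass over the items (objective: simpler).

-- ===== PORT A =====
def check_intent_rule_violation_py (intents : List (String × String)) : Option String :=
  if intents = [] then none
  else
    let has_surgical := intents.any (fun kv => PySem.Str.lower kv.2 == "surgical")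
    let has_medical := intents.any (fun kv => PySem.Str.lower kv.2 == "medical")
    if has_surgical && has_medical then
      let surgical_terms := (intents.filter (fun kv => PySem.Str.lower kv.2 == "surgical")).map Prod.fst
      let medical_terms := (intents.filter (fun kv => PySem.Str.lower kv.2 == "medical")).map Prod.fst
      some ("Rule 1 VIOLATION: Cannot combine surgical procedures ("
        ++ PySem.Str.join ", " surgical_terms
        ++ ") with medical management conditions ("
        ++ PySem.Str.join ", " medical_terms ++ ").")
    else none

-- ===== PORT B =====
def check_intent_rule_violation_py_alt (intents : List (String × String)) : Option String :=
  let acc := intents.foldl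
    (fun (acc : List String × List String) kv =>
      let lv := PySem.Str.lower kv.2
      if lv == "surgical" then (acc.1 ++ [kv.1], acc.2)
      else if lv == "medical" then (acc.1, acc.2 ++ [kv.1])
      else acc)
    ([], [])
  if !acc.1.isEmpty && !acc.2.isEmpty then
    some ("Rule 1 VIOLATION: Cannot combine surgical procedures ("
      ++ PySem.Str.join ", " acc.1
      ++ ") with medical management conditions ("
      ++ PySem.Str.join ", " acc.2 ++ ").")
  else none

-- ===== PRECONDITION & SPEC =====
def Spec_check_intent_rule_violation_py (intents : List (String × String)) (out : Option String) : Prop := out = check_intent_rule_violation_py_alt intents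
instance (intents : List (String × String)) (out : Option String) : Decidable (Spec_check_intent_rule_violation_py intents out) := by unfold Spec_check_intent_rule_violation_py; infer_instance

-- ===== CLAIM (what is proved, stated in full; the proofs are below) =====
def Claim_equal_check_intent_rule_violation_py : Prop := ∀ (intents : List (String × String)), Dom_check_intent_rule_violation_py intents → Spec_check_intent_rule_violation_py intents (check_intent_rule_violation_py intents)

-- ===== LEMMAS AND PROOFS =====

-- B's single fold produces exactly A's two filtered key lists (appended to the accumulator).
theorem pv_fold_eq (l : List (String × String)) (s m : List String) :
    l.foldl
      (fun (acc : List String × List String) kv =>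
        let lv := PySem.Str.lower kv.2
        if lv == "surgical" then (acc.1 ++ [kv.1], acc.2)
        else if lv == "medical" then (acc.1, acc.2 ++ [kv.1])
        else acc)
      (s, m)
    = (s ++ (l.filter (fun kv => PySem.Str.lower kv.2 == "surgical")).map Prod.fst,
       m ++ (l.filter (fun kv => PySem.Str.lower kv.2 == "medical")).map Prod.fst) := by
  induction l generalizing s m with
  | nil => simp
  | cons kv t ih =>
    by_cases hs : PySem.Str.lower kv.2 = "surgical"
    · simp only [List.foldl_cons]
      rw [show (let lv := PySem.Str.lower kv.2;
           if lv == "surgical" then ((s, m).1 ++ [kv.1], (s, m).2)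
           else if lv == "medical" then ((s, m).1, (s, m).2 ++ [kv.1])
           else (s, m)) = (s ++ [kv.1], m) from by simp [hs], ih]
      simp [hs]
    · by_cases hm : PySem.Str.lower kv.2 = "medical"
      · simp only [List.foldl_cons]
        rw [show (let lv := PySem.Str.lower kv.2;
             if lv == "surgical" then ((s, m).1 ++ [kv.1], (s, m).2)
             else if lv == "medical" then ((s, m).1, (s, m).2 ++ [kv.1])
             else (s, m)) = (s, m ++ [kv.1]) from by simp [hm], ih]
        simp [hm]
      · simp only [List.foldl_cons]
        rw [show (let lv := PySem.Str.lower kv.2;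
             if lv == "surgical" then ((s, m).1 ++ [kv.1], (s, m).2)
             else if lv == "medical" then ((s, m).1, (s, m).2 ++ [kv.1])
             else (s, m)) = (s, m) from by simp [hs, hm], ih]
        simp [hs, hm]

theorem pv_any_filter (p : String × String → Bool) (l : List (String × String)) :
    (((l.filter p).map Prod.fst).isEmpty = false) ↔ l.any p = true := by
  simp [List.filter_eq_nil_iff, List.any_eq_true]

-- ===== VERDICT (by name: the statement is the Claim_ definition above) =====
theorem check_intent_rule_violation_py_spec : Claim_equal_check_intent_rule_violation_py := by
  intro intents _
  unfold Spec_check_intent_rule_violation_py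
  unfold check_intent_rule_violation_py check_intent_rule_violation_py_alt
  rw [pv_fold_eq]
  by_cases hnil : intents = []
  · subst hnil; simp
  · simp only [hnil, if_false, List.nil_append]
    by_cases hs : intents.any (fun kv => PySem.Str.lower kv.2 == "surgical") = true
    · by_cases hm : intents.any (fun kv => PySem.Str.lower kv.2 == "medical") = true
      · simp [hs, hm, (pv_any_filter _ intents).mpr hs, (pv_any_filter _ intents).mpr hm]
      · have hm' : ((intents.filter (fun kv => PySem.Str.lower kv.2 == "medical")).map Prod.fst).isEmpty = true := by
          rcases Bool.eq_false_or_eq_true (((intents.filter (fun kv => PySem.Str.lower kv.2 == "medical")).map Prod.fst).isEmpty) with h | h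
          · exact h
          · exact absurd ((pv_any_filter _ intents).mp h) hm
        simp [hs, hm, hm']
    · have hs' : ((intents.filter (fun kv => PySem.Str.lower kv.2 == "surgical")).map Prod.fst).isEmpty = true := by
        rcases Bool.eq_false_or_eq_true (((intents.filter (fun kv => PySem.Str.lower kv.2 == "surgical")).map Prod.fst).isEmpty) with h | h
        · exact h
        · exact absurd ((pv_any_filter _ intents).mp h) hs
      simp [hs, hs']
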